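-- pv_equiv track=rewrite | github.com/wawanabnan/cargochains | core/templatetags/indo_format.py | _terbilang_integer
-- ===== SOURCE A (Python) =====
-- ONES = [
--     "", "satu", "dua", "tiga", "empat", "lima",
--     "enam", "tujuh", "delapan", "sembilan"
-- ]
--
-- THOUSANDS = [
--     "", "ribu", "juta", "miliar", "triliun"
-- ]
--
-- def _terbilang_integer(n):
--     """Konversi bilangan bulat ke terbilang."""
--     n = int(n)
--     if n == 0:
--         return "nol"
--
--     words = []
--     group = 0
--
--     while n > 0:
--         num = n % 1000
--         if num != 0:
--             words.append(_spell_group(num, THOUSANDS[group]))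
--         n //= 1000
--         group += 1
--
--     return " ".join(reversed(words)).strip()
--
-- def _spell_group(n, suffix):
--     """Terbilang 0–999."""
--     words = []
--
--     hundreds = n // 100
--     tens_units = n % 100
--     tens = tens_units // 10
--     ones = tens_units % 10
--
--     # ratus
--     if hundreds > 0:
--         if hundreds == 1:
--             words.append("seratus")
--         else:
--             words.append(ONES[hundreds] + " ratus")
--
--     # puluh / belas / satuan
--     if tens_units > 0:
--         if tens_units < 10:
--             words.append(ONES[tens_units])
--         elif tens_units < 20:
--             if tens_units == 10:
--                 words.append("sepuluh")
--             elif tens_units == 11: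
--                 words.append("sebelas")
--             else:
--                 words.append(ONES[ones] + " belas")
--         else:
--             words.append(ONES[tens] + " puluh")
--             if ones > 0:
--                 words.append(ONES[ones])
--
--     if suffix:
--         words.append(suffix)
--
--     return " ".join(words)
-- ===== SOURCE B (Python) =====
-- ONES = [
--     "", "satu", "dua", "tiga", "empat", "lima",
--     "enam", "tujuh", "delapan", "sembilan"
-- ]
--
-- SCALES = [
--     (10 ** 12, "triliun"), (10 ** 9, "miliar"),
--     (10 ** 6, "juta"), (10 ** 3, "ribu")
-- ]
--
-- def _small(n):
--     """Spell a three-digit group, top-down recursion."""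
--     if n >= 100:
--         head = "seratus" if n < 200 else ONES[n // 100] + " ratus"
--         rest = n % 100
--         return head + " " + _small(rest) if rest else head
--     if n >= 20:
--         tail = " " + ONES[n % 10] if n % 10 else ""
--         return ONES[n // 10] + " puluh" + tail
--     if n == 10:
--         return "sepuluh"
--     if n == 11:
--         return "sebelas"
--     if n >= 12:
--         return ONES[n % 10] + " belas"
--     return ONES[n]
--
-- def _terbilang_integer(n):
--     """Konversi bilangan bulat ke terbilang."""
--     n = int(n)
--     if n == 0:
--         return "nol"
--     if n < 0:
--         return ""
--     parts = []
--     for value, name in SCALES: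
--         if n >= value:
--             parts.append(_small(n // value) + " " + name)
--             n %= value
--     if n:
--         parts.append(_small(n))
--     return " ".join(parts)
-- ===== Notes on version B (the rewrite author's own statement) =====
-- stated objective: alternative
-- what changed: Replaced the collect-groups-low-to-high-then-reverse while-loop and the flat word-list builder for a three-digit group by a high-to-low pass over a fixed scale table with a top-down recursive group speller that recurses on the sub-hundred remainder.
import Mathlib
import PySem

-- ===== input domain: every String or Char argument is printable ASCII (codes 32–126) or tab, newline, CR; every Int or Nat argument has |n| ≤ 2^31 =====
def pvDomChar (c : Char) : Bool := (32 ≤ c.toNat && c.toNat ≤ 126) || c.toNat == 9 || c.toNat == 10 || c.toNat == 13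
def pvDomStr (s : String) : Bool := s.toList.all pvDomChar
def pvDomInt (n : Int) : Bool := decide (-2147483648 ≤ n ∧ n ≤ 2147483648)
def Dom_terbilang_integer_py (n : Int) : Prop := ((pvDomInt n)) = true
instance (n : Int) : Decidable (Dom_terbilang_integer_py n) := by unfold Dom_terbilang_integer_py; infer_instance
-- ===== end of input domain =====

-- B replaces A's low-to-high group collection + reverse by a high-to-low scale-table
-- pass with a top-down recursive 1-999 speller (objective: alternative decomposition).

def pvONES : List String := ["", "satu", "dua", "tiga", "empat", "lima", "enam", "tujuh", "delapan", "sembilan"]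
def pvTHOUSANDS : List String := ["", "ribu", "juta", "miliar", "triliun"]

-- ===== PORT A =====
-- ONES[i]/THOUSANDS[g] indexing via pyGet?; the `.getD ""` default is taken exactly
-- where Python would raise IndexError, which is unreachable from the entry on Dom.
def pvSpellGroup (n : Int) (suffix : String) : String :=
  let hundreds := PySem.Int.floordiv n 100
  let tens_units := PySem.Int.mod n 100
  let tens := PySem.Int.floordiv tens_units 10
  let ones := PySem.Int.mod tens_units 10
  let w1 : List String :=
    if hundreds > 0 then
      if hundreds = 1 then ["seratus"]
      else [((PySem.List.pyGet? pvONES hundreds).getD "") ++ " ratus"]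
    else []
  let w2 : List String :=
    if tens_units > 0 then
      if tens_units < 10 then [(PySem.List.pyGet? pvONES tens_units).getD ""]
      else if tens_units < 20 then
        if tens_units = 10 then ["sepuluh"]
        else if tens_units = 11 then ["sebelas"]
        else [((PySem.List.pyGet? pvONES ones).getD "") ++ " belas"]
      else (((PySem.List.pyGet? pvONES tens).getD "") ++ " puluh") ::
        (if ones > 0 then [(PySem.List.pyGet? pvONES ones).getD ""] else [])
    else []
  let w3 : List String := if suffix ≠ "" then [suffix] else []
  PySem.Str.join " " (w1 ++ w2 ++ w3)

def pvLoopA (n : Int) (group : Nat) (words : List String) : List String :=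
  if _h : 0 < n then
    let num := PySem.Int.mod n 1000
    let words' := if num ≠ 0 then
        words ++ [pvSpellGroup num ((PySem.List.pyGet? pvTHOUSANDS (group : Int)).getD "")]
      else words
    pvLoopA (PySem.Int.floordiv n 1000) (group + 1) words'
  else words
termination_by n.toNat
decreasing_by
  rw [PySem.Int.floordiv_eq_ediv_of_pos (by omega)]
  omega

def terbilang_integer_py (n : Int) : String :=
  if n = 0 then "nol"
  else PySem.Str.strip (PySem.Str.join " " (pvLoopA n 0 []).reverse)

-- ===== PORT B =====
-- _small recurses at most once (the recursive argument is the sub-hundred remainder, which takes a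
-- non-recursive branch), so fuel 2 makes the recursion total without changing any value.
def pvSmallGo : Nat → Int → String
  | 0, _ => ""
  | fuel + 1, n =>
    if 100 ≤ n then
      let head := if n < 200 then "seratus"
        else ((PySem.List.pyGet? pvONES (PySem.Int.floordiv n 100)).getD "") ++ " ratus"
      let rest := PySem.Int.mod n 100
      if rest ≠ 0 then head ++ " " ++ pvSmallGo fuel rest else head
    else if 20 ≤ n then
      ((PySem.List.pyGet? pvONES (PySem.Int.floordiv n 10)).getD "") ++ " puluh" ++
        (if PySem.Int.mod n 10 ≠ 0 then " " ++ ((PySem.List.pyGet? pvONES (PySem.Int.mod n 10)).getD "") else "")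
    else if n = 10 then "sepuluh"
    else if n = 11 then "sebelas"
    else if 12 ≤ n then ((PySem.List.pyGet? pvONES (PySem.Int.mod n 10)).getD "") ++ " belas"
    else (PySem.List.pyGet? pvONES n).getD ""

def pvSmall (n : Int) : String := pvSmallGo 2 n

def pvSCALES : List (Int × String) :=
  [(1000000000000, "triliun"), (1000000000, "miliar"), (1000000, "juta"), (1000, "ribu")]

def terbilang_integer_py_alt (n : Int) : String :=
  if n = 0 then "nol"
  else if n < 0 then ""
  else
    let st := pvSCALES.foldl (fun (st : Int × List String) vn =>
      if vn.1 ≤ st.1 then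
        (PySem.Int.mod st.1 vn.1, st.2 ++ [pvSmall (PySem.Int.floordiv st.1 vn.1) ++ " " ++ vn.2])
      else st) (n, [])
    PySem.Str.join " " (if st.1 ≠ 0 then st.2 ++ [pvSmall st.1] else st.2)

-- ===== PRECONDITION & SPEC =====
def Spec_terbilang_integer_py (n : Int) (out : String) : Prop := out = terbilang_integer_py_alt n
instance (n : Int) (out : String) : Decidable (Spec_terbilang_integer_py n out) := by unfold Spec_terbilang_integer_py; infer_instance

-- ===== CLAIM (what is proved, stated in full; the proofs are below) =====
def Claim_equal_terbilang_integer_py : Prop := ∀ (n : Int), Dom_terbilang_integer_py n → Spec_terbilang_integer_py n (terbilang_integer_py n)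

-- ===== LEMMAS AND PROOFS =====


-- proof-side helpers
def pvHeadW (h : Int) : String :=
  if h = 1 then "seratus" else ((PySem.List.pyGet? pvONES h).getD "") ++ " ratus"

def pvTensW (tu : Int) : List String :=
  if tu > 0 then
    if tu < 10 then [(PySem.List.pyGet? pvONES tu).getD ""]
    else if tu < 20 then
      if tu = 10 then ["sepuluh"]
      else if tu = 11 then ["sebelas"]
      else [((PySem.List.pyGet? pvONES (PySem.Int.mod tu 10)).getD "") ++ " belas"]
    else (((PySem.List.pyGet? pvONES (PySem.Int.floordiv tu 10)).getD "") ++ " puluh") ::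
      (if PySem.Int.mod tu 10 > 0 then [(PySem.List.pyGet? pvONES (PySem.Int.mod tu 10)).getD ""] else [])
  else []

def pvGoodC (l : List Char) : Bool :=
  match l.head?, l.reverse.head? with
  | some c, some d => !PySem.Chars.isspace c && !PySem.Chars.isspace d
  | _, _ => false

def pvGood (s : String) : Bool := pvGoodC s.toList


lemma pv_fd100 (h t : Int) (_hh : 0 ≤ h) (ht0 : 0 ≤ t) (ht : t < 100) :
    PySem.Int.floordiv (100 * h + t) 100 = h := by
  rw [PySem.Int.floordiv_eq_ediv_of_pos (by norm_num)]; omega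

lemma pv_md100 (h t : Int) (_hh : 0 ≤ h) (ht0 : 0 ≤ t) (ht : t < 100) :
    PySem.Int.mod (100 * h + t) 100 = t := by
  rw [PySem.Int.mod_eq_emod_of_pos (by norm_num)]; omega


lemma sg_decomp (h t : Int) (hh0 : 0 ≤ h) (ht0 : 0 ≤ t) (ht : t < 100) (suffix : String) :
    pvSpellGroup (100 * h + t) suffix =
      PySem.Str.join " " ((if 0 < h then [pvHeadW h] else []) ++ pvTensW t ++
        (if suffix ≠ "" then [suffix] else [])) := by
  simp only [pvSpellGroup, pv_fd100 h t hh0 ht0 ht, pv_md100 h t hh0 ht0 ht]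
  refine congrArg (PySem.Str.join " ") ?_
  unfold pvHeadW pvTensW
  split_ifs <;> rfl

lemma small_lt100 (t : Int) (ht : t < 100) (f : Nat) : pvSmallGo (f + 1) t = pvSmallGo 1 t := by
  have hn : ¬ ((100:Int) ≤ t) := by omega
  simp only [pvSmallGo, if_neg hn]

lemma small_decomp0 (t : Int) (ht : t < 100) : pvSmall t = pvSmallGo 1 t :=
  small_lt100 t ht 1

lemma small_decomp (h t : Int) (hh : 1 ≤ h) (hh9 : h ≤ 9) (ht0 : 0 ≤ t) (ht : t < 100) :
    pvSmall (100 * h + t) = if t ≠ 0 then pvHeadW h ++ " " ++ pvSmallGo 1 t else pvHeadW h := by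
  have e1 := pv_fd100 h t (by omega) ht0 ht
  have e2 := pv_md100 h t (by omega) ht0 ht
  have hp : ((100:Int) ≤ 100 * h + t) := by omega
  show pvSmallGo (1 + 1) _ = _
  simp only [pvSmallGo, if_pos hp, e1, e2]
  have hd : (if (100 * h + t : Int) < 200 then "seratus"
      else ((PySem.List.pyGet? pvONES h).getD "") ++ " ratus") = pvHeadW h := by
    unfold pvHeadW
    by_cases hc : h = 1
    · subst hc; rw [if_pos (by omega), if_pos rfl]
    · rw [if_neg (by omega), if_neg hc]
  rw [hd]


set_option maxRecDepth 100000 in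
lemma tens_char : ∀ t : Fin 100, t.val ≠ 0 →
    (PySem.Str.join " " (pvTensW t.val) = pvSmallGo 1 t.val ∧
     pvTensW t.val ≠ [] ∧ pvGood (pvSmallGo 1 t.val) = true) := by decide

set_option maxRecDepth 100000 in
lemma heads_char : ∀ h : Fin 10, h.val ≠ 0 → pvGood (pvHeadW h.val) = true := by decide

lemma goodC_ne_nil {l : List Char} (h : pvGoodC l = true) : l ≠ [] := by
  cases l <;> simp_all [pvGoodC]

lemma goodC_cons (c : Char) (cs : List Char) (d : Char) (ds : List Char)
    (hr : (c :: cs).reverse = d :: ds) :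
    pvGoodC (c :: cs) = (!PySem.Chars.isspace c && !PySem.Chars.isspace d) := by
  unfold pvGoodC
  rw [hr]
  simp

lemma goodC_append (l1 l2 : List Char) (h1 : pvGoodC l1 = true) (h2 : pvGoodC l2 = true) :
    pvGoodC (l1 ++ ' ' :: l2) = true := by
  cases l1 with
  | nil => exact absurd rfl (goodC_ne_nil h1)
  | cons c cs =>
    cases hr1 : (c :: cs).reverse with
    | nil => exact absurd (congrArg List.length hr1) (by simp)
    | cons d1 ds1 =>
      cases l2 with
      | nil => exact absurd rfl (goodC_ne_nil h2)
      | cons e es =>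
        cases hr2 : (e :: es).reverse with
        | nil => exact absurd (congrArg List.length hr2) (by simp)
        | cons f fs =>
          rw [goodC_cons c cs d1 ds1 hr1] at h1
          rw [goodC_cons e es f fs hr2] at h2
          have hrr : ((c :: cs) ++ ' ' :: e :: es).reverse
              = f :: (fs ++ ' ' :: (c :: cs).reverse) := by
            rw [List.reverse_append]
            simp [hr2]
          rw [List.cons_append]
          rw [goodC_cons c (cs ++ ' ' :: e :: es) f (fs ++ ' ' :: (c :: cs).reverse)
            (by rw [← List.cons_append]; exact hrr)]
          simp only [Bool.and_eq_true, Bool.not_eq_true'] at h1 h2 ⊢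
          exact ⟨h1.1, h2.2⟩

lemma good_append (a b : String) (ha : pvGood a = true) (hb : pvGood b = true) :
    pvGood (a ++ " " ++ b) = true := by
  unfold pvGood at *
  have : (a ++ " " ++ b).toList = a.toList ++ ' ' :: b.toList := by
    simp [String.toList_append]
  rw [this]
  exact goodC_append _ _ ha hb

lemma strip_goodC (l : List Char) (h : pvGoodC l = true) : PySem.Chars.strip l = l := by
  cases l with
  | nil => exact absurd rfl (goodC_ne_nil h)
  | cons c cs =>
    cases hr : (c :: cs).reverse with
    | nil => exact absurd (congrArg List.length hr) (by simp)
    | cons d ds =>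
      rw [goodC_cons c cs d ds hr] at h
      simp only [Bool.and_eq_true, Bool.not_eq_true'] at h
      unfold PySem.Chars.strip PySem.Chars.lstrip PySem.Chars.rstrip
      rw [List.dropWhile_cons, if_neg (by simp [h.1])]
      rw [hr, List.dropWhile_cons, if_neg (by simp [h.2]), ← hr, List.reverse_reverse]

lemma interc_cons (s x y : List Char) (zs : List (List Char)) :
    List.intercalate s (x :: y :: zs) = x ++ s ++ List.intercalate s (y :: zs) := by
  simp [List.intercalate, List.intersperse]

lemma joinC_good : ∀ ps : List (List Char), ps ≠ [] → (∀ p ∈ ps, pvGoodC p = true) →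
    pvGoodC (List.intercalate [' '] ps) = true := by
  intro ps
  induction ps with
  | nil => intro h; exact absurd rfl h
  | cons x xs ih =>
    intro _ hall
    cases xs with
    | nil =>
      simpa [List.intercalate] using hall x (by simp)
    | cons y ys =>
      have hx : pvGoodC x = true := hall x (by simp)
      have hrest : pvGoodC (List.intercalate [' '] (y :: ys)) = true :=
        ih (by simp) (fun p hp => hall p (by simp [hp]))
      rw [interc_cons, List.append_assoc]
      exact goodC_append _ _ hx hrest

lemma strip_join (ps : List String) (hne : ps ≠ []) (hall : ∀ p ∈ ps, pvGood p = true) :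
    PySem.Str.strip (PySem.Str.join " " ps) = PySem.Str.join " " ps := by
  apply String.toList_inj.mp
  rw [PySem.Str.toList_strip]
  apply strip_goodC
  have hj : (PySem.Str.join " " ps).toList = List.intercalate [' '] (ps.map String.toList) := by
    simp [PySem.Str.toList_join, PySem.Chars.join]
  rw [hj]
  apply joinC_good
  · simp [hne]
  · intro p hp
    simp only [List.mem_map] at hp
    obtain ⟨q, hq, rfl⟩ := hp
    exact hall q hq

lemma interc_append (s : List Char) : ∀ l1 l2 : List (List Char), l1 ≠ [] → l2 ≠ [] →
    List.intercalate s (l1 ++ l2) = List.intercalate s l1 ++ s ++ List.intercalate s l2 := by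
  intro l1
  induction l1 with
  | nil => intro l2 h; exact absurd rfl h
  | cons x xs ih =>
    intro l2 _ h2
    cases xs with
    | nil =>
      cases l2 with
      | nil => exact absurd rfl h2
      | cons y ys =>
        rw [List.singleton_append, interc_cons]
        simp [List.intercalate]
    | cons z zs =>
      have h := ih l2 (by simp) h2
      simp only [List.cons_append] at h ⊢
      rw [interc_cons, h, interc_cons]
      simp [List.append_assoc]

lemma join_append (l1 l2 : List String) (h1 : l1 ≠ []) (h2 : l2 ≠ []) :
    PySem.Str.join " " (l1 ++ l2) = PySem.Str.join " " l1 ++ " " ++ PySem.Str.join " " l2 := by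
  apply String.toList_inj.mp
  simp only [PySem.Str.toList_join, PySem.Chars.join, String.toList_append, List.map_append]
  rw [interc_append _ _ _ (by simp [h1]) (by simp [h2])]

lemma join_singleton (s : String) : PySem.Str.join " " [s] = s := by
  apply String.toList_inj.mp
  simp [PySem.Str.toList_join, PySem.Chars.join, List.intercalate]

def pvOpt (g : Int) (w : String) : List String := if g ≠ 0 then [w] else []

lemma pvOpt_congr (g : Int) (w w' : String) (h : g ≠ 0 → w = w') : pvOpt g w = pvOpt g w' := by
  unfold pvOpt
  split_ifs with hg
  · exact congrArg (fun s => [s]) (h hg)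
  · rfl

lemma pv_modf : ∀ a : Int, PySem.Int.mod a 1000 = a % 1000 :=
  fun a => PySem.Int.mod_eq_emod_of_pos (by norm_num)

lemma pv_fdf : ∀ a : Int, PySem.Int.floordiv a 1000 = a / 1000 :=
  fun a => PySem.Int.floordiv_eq_ediv_of_pos (by norm_num)

lemma loopA_nonpos (n : Int) (g : Nat) (w : List String) (h : ¬ 0 < n) :
    pvLoopA n g w = w := by
  rw [pvLoopA, dif_neg h]

lemma loopA_step (n : Int) (g : Nat) (w : List String) (h : 0 < n) :
    pvLoopA n g w = pvLoopA (n / 1000) (g + 1)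
      (if n % 1000 ≠ 0 then
        w ++ [pvSpellGroup (n % 1000) ((PySem.List.pyGet? pvTHOUSANDS (g : Int)).getD "")]
      else w) := by
  rw [pvLoopA, dif_pos h, pv_modf, pv_fdf]

lemma ite_append (c : Prop) [inst : Decidable c] (w : List String) (x : String) :
    (if c then w ++ [x] else w) = w ++ (if c then [x] else []) := by
  split <;> simp

set_option maxHeartbeats 1000000 in
lemma loopA_char (n : Int) (h0 : 0 < n) (hub : n ≤ 2147483648) :
    pvLoopA n 0 [] =
      pvOpt (n % 1000) (pvSpellGroup (n % 1000) "") ++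
      pvOpt (n / 1000 % 1000) (pvSpellGroup (n / 1000 % 1000) "ribu") ++
      pvOpt (n / 1000000 % 1000) (pvSpellGroup (n / 1000000 % 1000) "juta") ++
      pvOpt (n / 1000000000) (pvSpellGroup (n / 1000000000) "miliar") := by
  have th0 : ((PySem.List.pyGet? pvTHOUSANDS ((0 : Nat) : Int)).getD "") = "" := by decide
  have th1 : ((PySem.List.pyGet? pvTHOUSANDS ((0 + 1 : Nat) : Int)).getD "") = "ribu" := by decide
  have th2 : ((PySem.List.pyGet? pvTHOUSANDS ((0 + 1 + 1 : Nat) : Int)).getD "") = "juta" := by decide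
  have th3 : ((PySem.List.pyGet? pvTHOUSANDS ((0 + 1 + 1 + 1 : Nat) : Int)).getD "") = "miliar" := by decide
  rw [loopA_step n 0 [] h0, th0]
  by_cases h1 : 0 < n / 1000
  · rw [loopA_step _ _ _ h1, th1]
    by_cases h2 : 0 < n / 1000 / 1000
    · rw [loopA_step _ _ _ h2, th2]
      have d6 : n / 1000 / 1000 = n / 1000000 := by omega
      by_cases h3 : 0 < n / 1000 / 1000 / 1000
      · rw [loopA_step _ _ _ h3, th3]
        have d9 : n / 1000000 / 1000 % 1000 = n / 1000000000 := by omega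
        have d12 : n / 1000 / 1000 / 1000 / 1000 = 0 := by omega
        rw [loopA_nonpos _ _ _ (by omega)]
        simp only [ite_append]
        simp only [d6, d9, List.append_assoc, List.nil_append, pvOpt]
      · have d9 : n / 1000 / 1000 / 1000 = 0 := by omega
        have z9 : n / 1000000000 = 0 := by omega
        rw [loopA_nonpos _ _ _ h3]
        simp only [ite_append]
        simp only [d6, z9, List.append_assoc, List.nil_append, pvOpt]
        simp
    · have z6 : n / 1000000 = 0 := by omega
      have z6' : n / 1000 / 1000 = 0 := by omega
      have z9 : n / 1000000000 = 0 := by omega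
      rw [loopA_nonpos _ _ _ h2]
      simp only [ite_append]
      simp only [z6, z9, List.append_assoc, List.nil_append, pvOpt]
      simp
  · have z3 : n / 1000 % 1000 = 0 := by omega
    have z6 : n / 1000000 = 0 := by omega
    have z9 : n / 1000000000 = 0 := by omega
    rw [loopA_nonpos _ _ _ h1]
    simp only [ite_append]
    simp only [z3, z6, z9, List.append_assoc, List.nil_append, pvOpt]
    simp

lemma pv_m9 (a : Int) : PySem.Int.mod a 1000000000 = a % 1000000000 :=
  PySem.Int.mod_eq_emod_of_pos (by norm_num)
lemma pv_f9 (a : Int) : PySem.Int.floordiv a 1000000000 = a / 1000000000 :=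
  PySem.Int.floordiv_eq_ediv_of_pos (by norm_num)
lemma pv_m6 (a : Int) : PySem.Int.mod a 1000000 = a % 1000000 :=
  PySem.Int.mod_eq_emod_of_pos (by norm_num)
lemma pv_f6 (a : Int) : PySem.Int.floordiv a 1000000 = a / 1000000 :=
  PySem.Int.floordiv_eq_ediv_of_pos (by norm_num)

set_option maxHeartbeats 1000000 in
lemma altB_char (n : Int) (h0 : 0 < n) (hub : n ≤ 2147483648) :
    terbilang_integer_py_alt n = PySem.Str.join " "
      (pvOpt (n / 1000000000) (pvSmall (n / 1000000000) ++ " " ++ "miliar") ++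
       pvOpt (n / 1000000 % 1000) (pvSmall (n / 1000000 % 1000) ++ " " ++ "juta") ++
       pvOpt (n / 1000 % 1000) (pvSmall (n / 1000 % 1000) ++ " " ++ "ribu") ++
       pvOpt (n % 1000) (pvSmall (n % 1000))) := by
  unfold terbilang_integer_py_alt
  rw [if_neg (by omega : ¬ n = 0), if_neg (by omega : ¬ n < 0)]
  simp only [pvSCALES, List.foldl]
  try dsimp only
  rw [if_neg (by omega : ¬ (1000000000000 : Int) ≤ n)]
  simp only [pv_m9, pv_f9, pv_m6, pv_f6, pv_modf, pv_fdf]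
  by_cases h9 : (1000000000 : Int) ≤ n
  · rw [if_pos h9]
    try dsimp only
    have e1 : n % 1000000000 / 1000000 = n / 1000000 % 1000 := by omega
    rw [e1]
    by_cases h6 : (1000000 : Int) ≤ n % 1000000000
    · rw [if_pos h6]
      try dsimp only
      have e2 : n % 1000000000 % 1000000 / 1000 = n / 1000 % 1000 := by omega
      rw [e2]
      by_cases h3 : (1000 : Int) ≤ n % 1000000000 % 1000000
      · rw [if_pos h3]
        try dsimp only
        have e3 : n % 1000000000 % 1000000 % 1000 = n % 1000 := by omega
        rw [e3]
        simp only [pvOpt, if_pos (by omega : n / 1000000000 ≠ 0),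
          if_pos (by omega : n / 1000000 % 1000 ≠ 0), if_pos (by omega : n / 1000 % 1000 ≠ 0)]
        by_cases hz : n % 1000 ≠ 0
        · rw [if_pos hz, if_pos hz]; simp
        · rw [if_neg hz, if_neg hz]; simp
      · rw [if_neg h3]
        try dsimp only
        have z1 : n / 1000 % 1000 = 0 := by omega
        have e3 : n % 1000000000 % 1000000 = n % 1000 := by omega
        rw [e3]
        simp only [pvOpt, if_pos (by omega : n / 1000000000 ≠ 0),
          if_pos (by omega : n / 1000000 % 1000 ≠ 0), z1]
        by_cases hz : n % 1000 ≠ 0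
        · rw [if_pos hz, if_pos hz]; simp
        · rw [if_neg hz, if_neg hz]; simp
    · rw [if_neg h6]
      try dsimp only
      have z2 : n / 1000000 % 1000 = 0 := by omega
      have e2 : n % 1000000000 / 1000 = n / 1000 % 1000 := by omega
      rw [e2]
      by_cases h3 : (1000 : Int) ≤ n % 1000000000
      · rw [if_pos h3]
        try dsimp only
        have e3 : n % 1000000000 % 1000 = n % 1000 := by omega
        rw [e3]
        simp only [pvOpt, if_pos (by omega : n / 1000000000 ≠ 0),
          if_pos (by omega : n / 1000 % 1000 ≠ 0), z2]
        by_cases hz : n % 1000 ≠ 0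
        · rw [if_pos hz, if_pos hz]; simp
        · rw [if_neg hz, if_neg hz]; simp
      · rw [if_neg h3]
        try dsimp only
        have z3 : n / 1000 % 1000 = 0 := by omega
        have e3 : n % 1000000000 = n % 1000 := by omega
        rw [e3]
        simp only [pvOpt, if_pos (by omega : n / 1000000000 ≠ 0), z2, z3]
        by_cases hz : n % 1000 ≠ 0
        · rw [if_pos hz, if_pos hz]; simp
        · rw [if_neg hz, if_neg hz]; simp
  · rw [if_neg h9]
    try dsimp only
    have z0 : n / 1000000000 = 0 := by omega
    by_cases h6 : (1000000 : Int) ≤ n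
    · rw [if_pos h6]
      try dsimp only
      have e1 : n / 1000000 = n / 1000000 % 1000 := by omega
      have e2 : n % 1000000 / 1000 = n / 1000 % 1000 := by omega
      rw [e2]
      by_cases h3 : (1000 : Int) ≤ n % 1000000
      · rw [if_pos h3]
        try dsimp only
        have e3 : n % 1000000 % 1000 = n % 1000 := by omega
        rw [e3]
        simp only [pvOpt, z0, if_pos (by omega : n / 1000000 % 1000 ≠ 0),
          if_pos (by omega : n / 1000 % 1000 ≠ 0)]
        rw [← e1]
        by_cases hz : n % 1000 ≠ 0
        · rw [if_pos hz, if_pos hz]; simp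
        · rw [if_neg hz, if_neg hz]; simp
      · rw [if_neg h3]
        try dsimp only
        have z3 : n / 1000 % 1000 = 0 := by omega
        have e3 : n % 1000000 = n % 1000 := by omega
        rw [e3]
        simp only [pvOpt, z0, if_pos (by omega : n / 1000000 % 1000 ≠ 0), z3]
        rw [← e1]
        by_cases hz : n % 1000 ≠ 0
        · rw [if_pos hz, if_pos hz]; simp
        · rw [if_neg hz, if_neg hz]; simp
    · rw [if_neg h6]
      try dsimp only
      have z2 : n / 1000000 % 1000 = 0 := by omega
      have e2 : n / 1000 = n / 1000 % 1000 := by omega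
      by_cases h3 : (1000 : Int) ≤ n
      · rw [if_pos h3]
        try dsimp only
        simp only [pvOpt, z0, z2, if_pos (by omega : n / 1000 % 1000 ≠ 0)]
        rw [← e2]
        by_cases hz : n % 1000 ≠ 0
        · rw [if_pos hz, if_pos hz]; simp
        · rw [if_neg hz, if_neg hz]; simp
      · rw [if_neg h3]
        try dsimp only
        have z3 : n / 1000 % 1000 = 0 := by omega
        have e3 : n = n % 1000 := by omega
        simp only [pvOpt, z0, z2, z3]
        rw [if_pos (by omega : n ≠ 0), if_pos (by omega : n % 1000 ≠ 0)]
        rw [← e3]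
        simp

lemma tens_int (t : Int) (h1 : 0 < t) (h2 : t < 100) :
    PySem.Str.join " " (pvTensW t) = pvSmallGo 1 t ∧
    pvTensW t ≠ [] ∧ pvGood (pvSmallGo 1 t) = true := by
  have := tens_char ⟨t.toNat, by omega⟩ (by show t.toNat ≠ 0; omega)
  have e : ((t.toNat : Nat) : Int) = t := by omega
  rwa [e] at this

lemma heads_int (h : Int) (h1 : 0 < h) (h2 : h ≤ 9) : pvGood (pvHeadW h) = true := by
  have := heads_char ⟨h.toNat, by omega⟩ (by show h.toNat ≠ 0; omega)
  have e : ((h.toNat : Nat) : Int) = h := by omega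
  rwa [e] at this

lemma sg_small (g : Int) (hg1 : 0 < g) (hg2 : g < 1000) :
    pvSpellGroup g "" = pvSmall g ∧
    (∀ suf : String, suf ≠ "" → pvSpellGroup g suf = pvSmall g ++ " " ++ suf) ∧
    pvGood (pvSmall g) = true := by
  obtain ⟨h, t, hh0, hh9, ht0, ht, rfl⟩ :
      ∃ h t : Int, 0 ≤ h ∧ h ≤ 9 ∧ 0 ≤ t ∧ t < 100 ∧ g = 100 * h + t :=
    ⟨g / 100, g % 100, by omega, by omega, by omega, by omega, by omega⟩
  by_cases hh : h = 0
  · subst hh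
    have et : (100 * (0:Int) + t) = t := by ring
    have htpos : 0 < t := by omega
    obtain ⟨j1, j2, j3⟩ := tens_int t htpos ht
    have hs : pvSmall (100 * 0 + t) = pvSmallGo 1 t := by rw [et]; exact small_decomp0 t ht
    refine ⟨?_, ?_, ?_⟩
    · rw [sg_decomp 0 t le_rfl ht0 ht, if_neg (by norm_num), if_neg (by simp)]
      rw [List.nil_append, List.append_nil, j1, hs]
    · intro suf hsuf
      rw [sg_decomp 0 t le_rfl ht0 ht, if_neg (by norm_num), if_pos hsuf, List.nil_append]
      rw [join_append _ _ j2 (by simp), j1, join_singleton, hs]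
    · rw [hs]; exact j3
  · have hh1 : 1 ≤ h := by omega
    have hsd := small_decomp h t hh1 hh9 ht0 ht
    have hgood : pvGood (pvSmall (100 * h + t)) = true := by
      rw [hsd]
      by_cases hz : t = 0
      · rw [if_neg (by simp [hz])]
        exact heads_int h (by omega) hh9
      · rw [if_pos hz]
        exact good_append _ _ (heads_int h (by omega) hh9) (tens_int t (by omega) ht).2.2
    refine ⟨?_, ?_, hgood⟩
    · rw [sg_decomp h t hh0 ht0 ht, if_pos (by omega), if_neg (by simp), List.append_nil, hsd]
      by_cases hz : t = 0
      · rw [if_neg (by simp [hz])]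
        have : pvTensW t = [] := by subst hz; rfl
        rw [this, List.append_nil, join_singleton]
      · obtain ⟨j1, j2, _⟩ := tens_int t (by omega) ht
        rw [if_pos hz, join_append _ _ (by simp) j2, join_singleton, j1]
    · intro suf hsuf
      rw [sg_decomp h t hh0 ht0 ht, if_pos (by omega), if_pos hsuf, hsd]
      by_cases hz : t = 0
      · rw [if_neg (by simp [hz])]
        have : pvTensW t = [] := by subst hz; rfl
        rw [this, List.append_nil]
        rw [join_append _ _ (by simp) (by simp : ([suf]:List String) ≠ []), join_singleton,
          join_singleton]
      · obtain ⟨j1, j2, _⟩ := tens_int t (by omega) ht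
        rw [if_pos hz]
        rw [show ([pvHeadW h] ++ pvTensW t ++ [suf] : List String)
            = ([pvHeadW h] ++ pvTensW t) ++ [suf] by simp]
        rw [join_append _ _ (by simp) (by simp : ([suf]:List String) ≠ []),
          join_append _ _ (by simp) j2, join_singleton, join_singleton, j1]

lemma pvOpt_reverse (g : Int) (w : String) : (pvOpt g w).reverse = pvOpt g w := by
  unfold pvOpt; split <;> simp

lemma mem_pvOpt (p : String) (g : Int) (w : String) (h : p ∈ pvOpt g w) : p = w ∧ g ≠ 0 := by
  unfold pvOpt at h
  split at h <;> simp_all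

lemma pvOpt_eq_nil (g : Int) (w : String) (h : pvOpt g w = []) : g = 0 := by
  unfold pvOpt at h
  split at h <;> simp_all

theorem main_pos (n : Int) (h0 : 0 < n) (hub : n ≤ 2147483648) :
    terbilang_integer_py n = terbilang_integer_py_alt n := by
  have b3 : n / 1000000000 ≠ 0 → 0 < n / 1000000000 ∧ n / 1000000000 < 1000 := by omega
  have b2 : n / 1000000 % 1000 ≠ 0 → 0 < n / 1000000 % 1000 ∧ n / 1000000 % 1000 < 1000 := by omega
  have b1 : n / 1000 % 1000 ≠ 0 → 0 < n / 1000 % 1000 ∧ n / 1000 % 1000 < 1000 := by omega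
  have b0 : n % 1000 ≠ 0 → 0 < n % 1000 ∧ n % 1000 < 1000 := by omega
  have r3 : pvOpt (n / 1000000000) (pvSpellGroup (n / 1000000000) "miliar")
      = pvOpt (n / 1000000000) (pvSmall (n / 1000000000) ++ " " ++ "miliar") :=
    pvOpt_congr _ _ _ (fun hg =>
      (sg_small _ (b3 hg).1 (b3 hg).2).2.1 "miliar" (by decide))
  have r2 : pvOpt (n / 1000000 % 1000) (pvSpellGroup (n / 1000000 % 1000) "juta")
      = pvOpt (n / 1000000 % 1000) (pvSmall (n / 1000000 % 1000) ++ " " ++ "juta") :=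
    pvOpt_congr _ _ _ (fun hg =>
      (sg_small _ (b2 hg).1 (b2 hg).2).2.1 "juta" (by decide))
  have r1 : pvOpt (n / 1000 % 1000) (pvSpellGroup (n / 1000 % 1000) "ribu")
      = pvOpt (n / 1000 % 1000) (pvSmall (n / 1000 % 1000) ++ " " ++ "ribu") :=
    pvOpt_congr _ _ _ (fun hg =>
      (sg_small _ (b1 hg).1 (b1 hg).2).2.1 "ribu" (by decide))
  have r0 : pvOpt (n % 1000) (pvSpellGroup (n % 1000) "")
      = pvOpt (n % 1000) (pvSmall (n % 1000)) :=
    pvOpt_congr _ _ _ (fun hg => (sg_small _ (b0 hg).1 (b0 hg).2).1)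
  unfold terbilang_integer_py
  rw [if_neg (by omega : ¬ n = 0), loopA_char n h0 hub, altB_char n h0 hub]
  simp only [List.reverse_append, pvOpt_reverse, List.append_assoc]
  rw [r3, r2, r1, r0]
  set P3 := pvOpt (n / 1000000000) (pvSmall (n / 1000000000) ++ " " ++ "miliar") with hP3
  set P2 := pvOpt (n / 1000000 % 1000) (pvSmall (n / 1000000 % 1000) ++ " " ++ "juta") with hP2
  set P1 := pvOpt (n / 1000 % 1000) (pvSmall (n / 1000 % 1000) ++ " " ++ "ribu") with hP1
  set P0 := pvOpt (n % 1000) (pvSmall (n % 1000)) with hP0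
  have hne : P3 ++ (P2 ++ (P1 ++ P0)) ≠ [] := by
    intro hnil
    rw [List.append_eq_nil_iff, List.append_eq_nil_iff, List.append_eq_nil_iff] at hnil
    obtain ⟨e3, e2, e1, e0⟩ := hnil
    have := pvOpt_eq_nil _ _ e3
    have := pvOpt_eq_nil _ _ e2
    have := pvOpt_eq_nil _ _ e1
    have := pvOpt_eq_nil _ _ e0
    omega
  have hall : ∀ p ∈ P3 ++ (P2 ++ (P1 ++ P0)), pvGood p = true := by
    intro p hp
    rw [List.mem_append] at hp
    rcases hp with hp | hp
    · obtain ⟨rfl, hg⟩ := mem_pvOpt _ _ _ hp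
      exact good_append _ _ (sg_small _ (b3 hg).1 (b3 hg).2).2.2 (by decide)
    · rw [List.mem_append] at hp
      rcases hp with hp | hp
      · obtain ⟨rfl, hg⟩ := mem_pvOpt _ _ _ hp
        exact good_append _ _ (sg_small _ (b2 hg).1 (b2 hg).2).2.2 (by decide)
      · rw [List.mem_append] at hp
        rcases hp with hp | hp
        · obtain ⟨rfl, hg⟩ := mem_pvOpt _ _ _ hp
          exact good_append _ _ (sg_small _ (b1 hg).1 (b1 hg).2).2.2 (by decide)
        · obtain ⟨rfl, hg⟩ := mem_pvOpt _ _ _ hp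
          exact (sg_small _ (b0 hg).1 (b0 hg).2).2.2
  exact strip_join _ hne hall

lemma main_neg (n : Int) (hneg : n < 0) :
    terbilang_integer_py n = terbilang_integer_py_alt n := by
  unfold terbilang_integer_py terbilang_integer_py_alt
  rw [if_neg (by omega : ¬ n = 0), if_neg (by omega : ¬ n = 0), if_pos hneg,
    loopA_nonpos _ _ _ (by omega)]
  decide

-- ===== VERDICT (by name: the statement is the Claim_ definition above) =====
theorem terbilang_integer_py_spec : Claim_equal_terbilang_integer_py := by
  unfold Claim_equal_terbilang_integer_py Spec_terbilang_integer_py Dom_terbilang_integer_py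
  intro n hdom
  have hd : -2147483648 ≤ n ∧ n ≤ 2147483648 := by simpa [pvDomInt] using hdom
  by_cases h0 : n = 0
  · subst h0; rfl
  · by_cases hneg : n < 0
    · exact main_neg n hneg
    · exact main_pos n (by omega) hd.2
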